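-- pv_equiv track=rewrite | github.com/jensenerik/aoc2024 | solutions/solution24.py | binary_z
-- ===== SOURCE A (Python) =====
-- from typing import Dict, List, NamedTuple, Tuple
--
-- def binary_z(value_map: Dict[str, int]) -> int:
--     just_z = sorted([k for k in value_map if k[0] == "z"])
--     running_sum = 0
--     cur_exponent = 0
--     for z_val in just_z:
--         running_sum += value_map[z_val] * (2**cur_exponent)
--         cur_exponent += 1
--     return running_sum
-- ===== SOURCE B (Python) =====
-- def binary_z(value_map):
--     total = 0
--     for key, value in value_map.items():
--         if key.startswith("z"):
--             exponent = sum(1 for other in value_map if other.startswith("z") and other < key)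
--             total += value * 2 ** exponent
--     return total
-- ===== Notes on version B (the rewrite author's own statement) =====
-- stated objective: alternative
-- what changed: B eliminates sorting, the dict lookup and the running exponent entirely: it scans the items once and adds value * 2**rank for each z-key, where the rank (bit position) is counted directly as the number of strictly smaller z-keys.
import Mathlib
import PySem

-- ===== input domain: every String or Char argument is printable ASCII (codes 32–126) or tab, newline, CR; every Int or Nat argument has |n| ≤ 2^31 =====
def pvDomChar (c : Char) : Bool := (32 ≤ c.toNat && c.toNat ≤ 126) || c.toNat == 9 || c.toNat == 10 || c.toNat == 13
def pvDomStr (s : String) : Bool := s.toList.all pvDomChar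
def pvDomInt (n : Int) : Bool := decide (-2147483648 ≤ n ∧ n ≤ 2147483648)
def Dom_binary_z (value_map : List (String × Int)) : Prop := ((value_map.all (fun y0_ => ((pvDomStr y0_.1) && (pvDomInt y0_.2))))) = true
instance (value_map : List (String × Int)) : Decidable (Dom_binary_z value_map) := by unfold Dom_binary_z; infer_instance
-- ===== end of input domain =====

-- B drops the sort, the dict lookup and the running exponent: one scan over the items adding
-- value * 2^(number of strictly smaller z-keys); same return value, a different algorithm (O(n^2), not faster).

-- ===== PORT A =====
-- dict lookup value_map[z_val] (key always present, so the default is unreachable)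
def pvLookup (m : List (String × Int)) (k : String) : Int :=
  (PySem.Dict.mk m).getD k 0

def binary_z (value_map : List (String × Int)) : Int :=
  -- just_z = sorted([k for k in value_map if k[0] == "z"])  (k[0] on "" raises IndexError: excluded by Pre_)
  let just_z := PySem.List.sorted
      ((value_map.map (·.1)).filter (fun k => PySem.Str.pyGet? k 0 == some 'z')) (fun x => x) false
  -- running_sum/cur_exponent loop
  (just_z.foldl (fun st z => (st.1 + pvLookup value_map z * 2 ^ st.2, st.2 + 1)) ((0 : Int), (0 : Nat))).1

-- ===== PORT B =====
-- exponent = sum(1 for other in value_map if other.startswith("z") and other < key)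
def pvZRank (value_map : List (String × Int)) (key : String) : Nat :=
  ((value_map.map (·.1)).filter
      (fun other => PySem.Str.startswith other "z" && decide (other < key))).length

def binary_z_alt (value_map : List (String × Int)) : Int :=
  value_map.foldl
    (fun total kv =>
      if PySem.Str.startswith kv.1 "z" then total + kv.2 * 2 ^ pvZRank value_map kv.1
      else total) 0

-- ===== PRECONDITION & SPEC =====
-- Pre_ excludes (a) maps with an empty-string key, where A raises IndexError on k[0], and
-- (b) association lists with duplicate z-prefixed keys, which cannot arise from a Python dict
-- (the dict collapses them), so the list-level corner is an artefact of the encoding.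
def Pre_binary_z (value_map : List (String × Int)) : Prop :=
  (∀ p ∈ value_map, p.1 ≠ "") ∧
    ((value_map.map (·.1)).filter (fun k => PySem.Str.startswith k "z")).Nodup
instance (value_map : List (String × Int)) : Decidable (Pre_binary_z value_map) := by
  unfold Pre_binary_z; infer_instance

def pvWitness_binary_z : (List (String × Int)) := [("z1", 1), ("z0", 0), ("ab", 7)]

def Spec_binary_z (value_map : List (String × Int)) (out : Int) : Prop := out = binary_z_alt value_map
instance (value_map : List (String × Int)) (out : Int) : Decidable (Spec_binary_z value_map out) := by unfold Spec_binary_z; infer_instance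

-- ===== CLAIM (what is proved, stated in full; the proofs are below) =====
def Claim_equal_binary_z : Prop := ∀ (value_map : List (String × Int)), Dom_binary_z value_map → Pre_binary_z value_map → Spec_binary_z value_map (binary_z value_map)

-- ===== LEMMAS AND PROOFS =====

-- the two z-tests agree on nonempty keys (k[0] == "z" vs startswith)
lemma pvStartsEq (k : String) (h : k ≠ "") :
    (PySem.Str.pyGet? k 0 == some 'z') = PySem.Str.startswith k "z" := by
  have h' : k.toList ≠ [] := by simpa [String.toList_eq_nil_iff] using h
  simp only [pysem]
  cases hk : k.toList with
  | nil => exact absurd hk h'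
  | cons c t => simp [PySem.Chars.startswith, List.isPrefixOf, eq_comm]

-- first-match dict lookup returns the stored value of a z-entry when the z-keys are distinct
lemma pvLookup_mem (value_map : List (String × Int))
    (hnd : ((value_map.map (·.1)).filter (fun k => PySem.Str.startswith k "z")).Nodup)
    (kv : String × Int) (hm : kv ∈ value_map)
    (hz : PySem.Str.startswith kv.1 "z" = true) : pvLookup value_map kv.1 = kv.2 := by
  induction value_map with
  | nil => simp at hm
  | cons a t ih =>
    simp only [List.map_cons, List.filter_cons] at hnd
    rcases List.mem_cons.mp hm with rfl | hmt
    · simp [pvLookup, PySem.Dict.getD, PySem.Dict.get?]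
    · have hkt : kv.1 ∈ (t.map (·.1)).filter (fun k => PySem.Str.startswith k "z") :=
        List.mem_filter.mpr ⟨List.mem_map_of_mem hmt, hz⟩
      have hne : a.1 ≠ kv.1 := by
        intro he
        rw [he, hz] at hnd
        exact (List.nodup_cons.mp hnd).1 (he ▸ hkt)
      have hndt : ((t.map (·.1)).filter (fun k => PySem.Str.startswith k "z")).Nodup := by
        by_cases hpa : PySem.Str.startswith a.1 "z" = true
        · rw [hpa] at hnd; exact (List.nodup_cons.mp hnd).2
        · simp only [Bool.not_eq_true] at hpa; rw [hpa] at hnd; simpa using hnd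
      have := ih hndt hmt
      simpa [pvLookup, PySem.Dict.getD, PySem.Dict.get?, hne] using this

-- A's (running_sum, cur_exponent) fold, started at (s, e)
lemma pvFoldA (v : String → Int) (l : List String) (s : Int) (e : Nat) :
    (l.foldl (fun st z => (st.1 + v z * 2 ^ st.2, st.2 + 1)) (s, e)).1
      = s + 2 ^ e * l.foldr (fun a acc => v a + 2 * acc) 0 := by
  induction l generalizing s e with
  | nil => simp
  | cons a t ih => simp [ih, pow_succ]; ring

-- on a strictly increasing list, the Horner foldr is the rank-weighted sum
lemma pvFoldrRank (v : String → Int) (s : List String) (hs : s.Pairwise (· < ·)) :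
    s.foldr (fun a acc => v a + 2 * acc) 0
      = (s.map (fun k => v k * 2 ^ (s.filter (fun o => decide (o < k))).length)).sum := by
  induction s with
  | nil => simp
  | cons a t ih =>
    have ha : ∀ o ∈ t, a < o := fun o ho => (List.pairwise_cons.mp hs).1 o ho
    have h0 : ((a :: t).filter (fun o => decide (o < a))).length = 0 := by
      simp only [List.length_eq_zero_iff, List.filter_eq_nil_iff]
      intro o ho
      rcases List.mem_cons.mp ho with rfl | hot
      · simp
      · simpa using not_lt_of_gt (ha o hot)
    have hstep : ∀ k ∈ t, ((a :: t).filter (fun o => decide (o < k))).length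
        = (t.filter (fun o => decide (o < k))).length + 1 := by
      intro k hk
      have hak := ha k hk
      rw [String.lt_iff_toList_lt] at hak
      simp [hak]
    rw [List.foldr_cons, ih (List.pairwise_cons.mp hs).2, List.map_cons, List.sum_cons, h0]
    have hmap : (t.map (fun k => v k * 2 ^ ((a :: t).filter (fun o => decide (o < k))).length)).sum
        = (t.map (fun k => 2 * (v k * 2 ^ (t.filter (fun o => decide (o < k))).length))).sum := by
      apply congrArg
      apply List.map_congr_left
      intro k hk
      rw [hstep k hk, pow_succ]
      ring
    rw [hmap]
    simp [List.sum_map_mul_left]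

theorem binary_z_spec : Claim_equal_binary_z := by
  intro value_map _ hpre
  obtain ⟨hne, hnd⟩ := hpre
  unfold Spec_binary_z binary_z binary_z_alt
  set P : String → Bool := fun k => PySem.Str.startswith k "z" with hP
  set zs : List String := (value_map.map (·.1)).filter P with hzs
  set v : String → Int := pvLookup value_map with hv
  -- A's comprehension filter is zs
  have hfe : (value_map.map (·.1)).filter (fun k => PySem.Str.pyGet? k 0 == some 'z') = zs := by
    rw [hzs]
    apply List.filter_congr
    intro k hk
    obtain ⟨p, hp, rfl⟩ := List.mem_map.mp hk
    exact pvStartsEq p.1 (hne p hp)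
  rw [hfe, pvFoldA]
  simp only [pow_zero, one_mul, zero_add]
  -- the sorted key list is strictly increasing
  set s : List String := PySem.List.sorted zs (fun x => x) false with hs
  have hperm : s.Perm zs := PySem.List.sorted_perm zs _ false
  have hnds : s.Nodup := hperm.nodup_iff.mpr hnd
  have hlt : s.Pairwise (· < ·) :=
    ((PySem.List.sorted_pairwise zs (fun x => x)).and hnds).imp
      (fun h => lt_of_le_of_ne h.1 h.2)
  rw [pvFoldrRank v s hlt]
  -- ranks over s equal ranks over zs; transport the sum along the permutation
  have hrank : ∀ k, (s.filter (fun o => decide (o < k))).length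
      = (zs.filter (fun o => decide (o < k))).length :=
    fun k => (hperm.filter _).length_eq
  set g : String → Int :=
    fun k => v k * 2 ^ (zs.filter (fun o => decide (o < k))).length with hg
  have hmapeq : s.map (fun k => v k * 2 ^ (s.filter (fun o => decide (o < k))).length)
      = s.map g := List.map_congr_left (fun k _ => by rw [hg, hrank k])
  rw [hmapeq, (hperm.map g).sum_eq]
  -- B's loop is the sum of g over the z-entries
  rw [PySem.List.foldl_if_eq_foldl_filter, PySem.List.foldl_add]
  simp only [zero_add]
  -- each entry's rank is the rank over zs, and its stored value is the lookup
  have hrk : ∀ k, pvZRank value_map k = (zs.filter (fun o => decide (o < k))).length := by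
    intro k
    unfold pvZRank
    rw [hzs, List.filter_filter]
    exact congrArg List.length (List.filter_congr (fun o _ => by simp [hP, Bool.and_comm, pysem]))
  have hB : (value_map.filter (fun kv => P kv.1)).map
        (fun kv => kv.2 * 2 ^ pvZRank value_map kv.1)
      = (value_map.filter (fun kv => P kv.1)).map (fun kv => g kv.1) := by
    apply List.map_congr_left
    intro kv hkv
    simp only [hg]
    rw [hrk kv.1, hv,
      pvLookup_mem value_map hnd kv (List.mem_of_mem_filter hkv) (List.mem_filter.mp hkv).2]
  rw [hB]
  -- finally, mapping g over the z-keys is mapping g ∘ fst over the z-entries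
  have hkeys : zs = (value_map.filter (fun kv => P kv.1)).map (·.1) := by
    rw [hzs, List.filter_map]; rfl
  rw [hkeys, List.map_map]
  rfl
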